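-- pv_equiv track=rewrite | github.com/Mardy445/KenKenGenerator | block.py | intersection_of_tiles_and_possible_sets
-- ===== SOURCE A (Python) =====
-- import itertools
--
-- def intersection_of_tiles_and_possible_sets(possible_sets, tile_number_possibilities):
--     if len(tile_number_possibilities) == 0 or len(possible_sets) == 0:
--         return []
--     hold = []
--     try:
--         combine = list(itertools.product(tile_number_possibilities, possible_sets))
--     except MemoryError:
--         return set([])
--
--     for a, b in combine:
--         status = True
--         for v in a:
--             if v not in b:
--                 status = False
--                 break
--         if status:
--             hold.append(a)
--     return set(hold)
-- ===== SOURCE B (Python) =====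
-- def intersection_of_tiles_and_possible_sets(possible_sets, tile_number_possibilities):
--     if len(tile_number_possibilities) == 0 or len(possible_sets) == 0:
--         return []
--     index = {}
--     for i, b in enumerate(possible_sets):
--         for v in b:
--             index.setdefault(v, set()).add(i)
--     hold = []
--     for a in tile_number_possibilities:
--         cand = set(range(len(possible_sets)))
--         for v in a:
--             cand = cand & index.get(v, set())
--         if cand:
--             hold.append(a)
--     return set(hold)
-- ===== Notes on version B (the rewrite author's own statement) =====
-- stated objective: alternative
-- what changed: Replaces A's materialized cartesian product and per-pair membership scan with an inverted index (value -> set of indices of possible_sets containing it) built once, then a posting-set intersection per tuple, appending each matching tuple once instead of once per matching set.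
import Mathlib
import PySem

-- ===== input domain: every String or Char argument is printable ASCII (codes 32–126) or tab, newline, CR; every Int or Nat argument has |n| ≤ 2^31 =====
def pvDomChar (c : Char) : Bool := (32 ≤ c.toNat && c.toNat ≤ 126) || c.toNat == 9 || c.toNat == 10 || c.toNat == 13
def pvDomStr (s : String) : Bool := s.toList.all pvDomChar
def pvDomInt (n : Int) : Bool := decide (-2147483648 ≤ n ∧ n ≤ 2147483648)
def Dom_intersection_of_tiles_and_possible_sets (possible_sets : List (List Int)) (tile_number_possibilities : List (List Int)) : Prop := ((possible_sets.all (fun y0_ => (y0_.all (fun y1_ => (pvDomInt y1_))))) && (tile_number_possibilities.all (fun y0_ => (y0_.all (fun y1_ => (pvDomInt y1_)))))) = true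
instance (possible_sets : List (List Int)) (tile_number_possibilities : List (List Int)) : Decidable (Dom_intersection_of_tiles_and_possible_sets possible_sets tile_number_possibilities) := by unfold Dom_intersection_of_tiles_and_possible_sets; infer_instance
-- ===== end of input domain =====

-- B replaces A's materialized cartesian product + per-pair membership scan by an inverted
-- index (value -> set of indices of possible_sets containing it) and a posting-set
-- intersection per tuple (objective: alternative; A's MemoryError fallback is unreachable here).

-- ===== PORT A =====
-- inner 'for v in a: if v not in b: status = False; break' loop of A
def pvAllIn (a b : List Int) : Bool :=
  match a with
  | [] => true
  | v :: rest => if b.contains v then pvAllIn rest b else false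

def intersection_of_tiles_and_possible_sets (possible_sets : List (List Int)) (tile_number_possibilities : List (List Int)) : List (List Int) :=
  if tile_number_possibilities.length = 0 ∨ possible_sets.length = 0 then []
  else
    -- combine = list(itertools.product(tile_number_possibilities, possible_sets))
    let combine := tile_number_possibilities.flatMap (fun a => possible_sets.map (fun b => (a, b)))
    let hold := combine.foldl (fun h p => if pvAllIn p.1 p.2 then h ++ [p.1] else h) ([] : List (List Int))
    PySem.Set.ofList hold

-- ===== PORT B =====
-- index.setdefault(v, set()).add(i) over enumerate(possible_sets)
def pvBuildIndex (possible_sets : List (List Int)) : PySem.Dict Int (PySem.Set Int) :=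
  (PySem.List.enumerate possible_sets).foldl
    (fun d p => p.2.foldl (fun d v => d.modify v PySem.Set.empty (fun s => PySem.Set.add s p.1)) d)
    PySem.Dict.empty

-- cand = set(range(n)); for v in a: cand = cand & index.get(v, set())
def pvCand (index : PySem.Dict Int (PySem.Set Int)) (n : Int) (a : List Int) : PySem.Set Int :=
  a.foldl (fun c v => PySem.Set.inter c (index.getD v PySem.Set.empty))
    (PySem.Set.ofList (PySem.List.pyRange 0 n 1))

def intersection_of_tiles_and_possible_sets_alt (possible_sets : List (List Int)) (tile_number_possibilities : List (List Int)) : List (List Int) :=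
  if tile_number_possibilities.length = 0 ∨ possible_sets.length = 0 then []
  else
    let index := pvBuildIndex possible_sets
    let hold := tile_number_possibilities.foldl
      (fun h a => if (pvCand index (possible_sets.length : Int) a).isEmpty then h else h ++ [a])
      ([] : List (List Int))
    PySem.Set.ofList hold

-- ===== PRECONDITION & SPEC =====
def Spec_intersection_of_tiles_and_possible_sets (possible_sets : List (List Int)) (tile_number_possibilities : List (List Int)) (out : List (List Int)) : Prop := out = intersection_of_tiles_and_possible_sets_alt possible_sets tile_number_possibilities
instance (possible_sets : List (List Int)) (tile_number_possibilities : List (List Int)) (out : List (List Int)) : Decidable (Spec_intersection_of_tiles_and_possible_sets possible_sets tile_number_possibilities out) := by unfold Spec_intersection_of_tiles_and_possible_sets; infer_instance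

-- ===== CLAIM (what is proved, stated in full; the proofs are below) =====
def Claim_equal_intersection_of_tiles_and_possible_sets : Prop := ∀ (possible_sets : List (List Int)) (tile_number_possibilities : List (List Int)), Dom_intersection_of_tiles_and_possible_sets possible_sets tile_number_possibilities → Spec_intersection_of_tiles_and_possible_sets possible_sets tile_number_possibilities (intersection_of_tiles_and_possible_sets possible_sets tile_number_possibilities)

-- ===== LEMMAS AND PROOFS =====

theorem pvAllIn_iff (a b : List Int) : pvAllIn a b = true ↔ ∀ v ∈ a, v ∈ b := by
  induction a with
  | nil => simp [pvAllIn]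
  | cons v rest ih =>
    simp only [pvAllIn, List.mem_cons]
    by_cases h : v ∈ b
    · simp [h, ih]
    · simp [h]

-- inner index-building loop over one set b with index j
theorem pv_index_inner (b : List Int) (d : PySem.Dict Int (PySem.Set Int)) (j v i : Int) :
    i ∈ (b.foldl (fun d w => d.modify w PySem.Set.empty (fun s => PySem.Set.add s j)) d).getD v PySem.Set.empty
      ↔ i ∈ d.getD v PySem.Set.empty ∨ (i = j ∧ v ∈ b) := by
  induction b generalizing d with
  | nil => simp
  | cons w rest ih =>
    simp only [List.foldl_cons, ih, PySem.Dict.getD_modify, List.mem_cons]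
    by_cases hvw : v = w
    · subst hvw; simp [PySem.Set.mem_add]; tauto
    · simp [hvw]

-- outer index-building loop
theorem pv_index_outer (l : List (Int × List Int)) (d : PySem.Dict Int (PySem.Set Int)) (v i : Int) :
    i ∈ (l.foldl (fun d p => p.2.foldl (fun d w => d.modify w PySem.Set.empty (fun s => PySem.Set.add s p.1)) d) d).getD v PySem.Set.empty
      ↔ i ∈ d.getD v PySem.Set.empty ∨ ∃ p ∈ l, p.1 = i ∧ v ∈ p.2 := by
  induction l generalizing d with
  | nil => simp
  | cons p rest ih =>
    simp only [List.foldl_cons, ih, pv_index_inner, List.mem_cons]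
    constructor
    · rintro (⟨h | ⟨rfl, hv⟩⟩ | ⟨q, hq, h1, h2⟩)
      · exact Or.inl h
      · exact Or.inr ⟨p, Or.inl rfl, rfl, hv⟩
      · exact Or.inr ⟨q, Or.inr hq, h1, h2⟩
    · rintro (h | ⟨q, (rfl | hq), h1, h2⟩)
      · exact Or.inl (Or.inl h)
      · exact Or.inl (Or.inr ⟨h1.symm, h2⟩)
      · exact Or.inr ⟨q, hq, h1, h2⟩

theorem pv_mem_index (ps : List (List Int)) (v i : Int) :
    i ∈ (pvBuildIndex ps).getD v PySem.Set.empty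
      ↔ ∃ k : Nat, ∃ _ : k < ps.length, i = (k : Int) ∧ v ∈ ps[k] := by
  unfold pvBuildIndex
  rw [pv_index_outer]
  simp only [PySem.Dict.getD_empty]
  constructor
  · rintro (h | ⟨p, hp, h1, h2⟩)
    · simp [PySem.Set.empty] at h
    · rw [PySem.List.mem_enumerate_iff] at hp
      obtain ⟨k, hk, rfl⟩ := hp
      exact ⟨k, hk, by simpa using h1.symm, by simpa using h2⟩
  · rintro ⟨k, hk, rfl, hv⟩
    refine Or.inr ⟨((k : Int), ps[k]), ?_, by simp, hv⟩
    rw [PySem.List.mem_enumerate_iff]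
    exact ⟨k, hk, by simp⟩

theorem pv_mem_cand (idx : PySem.Dict Int (PySem.Set Int)) (n : Int) (a : List Int) (i : Int) :
    i ∈ pvCand idx n a ↔ (0 ≤ i ∧ i < n) ∧ ∀ v ∈ a, i ∈ idx.getD v PySem.Set.empty := by
  unfold pvCand
  have h : ∀ (a : List Int) (c0 : PySem.Set Int),
      i ∈ a.foldl (fun c v => PySem.Set.inter c (idx.getD v PySem.Set.empty)) c0
        ↔ i ∈ c0 ∧ ∀ v ∈ a, i ∈ idx.getD v PySem.Set.empty := by
    intro a
    induction a with
    | nil => simp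
    | cons v rest ih =>
      intro c0
      simp only [List.foldl_cons, ih, PySem.Set.mem_inter, List.mem_cons]
      constructor
      · rintro ⟨⟨h0, hv⟩, hrest⟩
        exact ⟨h0, fun w hw => hw.elim (fun e => e ▸ hv) (hrest w)⟩
      · rintro ⟨h0, hall⟩
        exact ⟨⟨h0, hall v (Or.inl rfl)⟩, fun w hw => hall w (Or.inr hw)⟩
  rw [h, PySem.Set.mem_ofList, PySem.List.mem_pyRange_one]

theorem pv_cand_isEmpty (ps : List (List Int)) (a : List Int) :
    (pvCand (pvBuildIndex ps) (ps.length : Int) a).isEmpty = true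
      ↔ ∀ b ∈ ps, ¬ ∀ v ∈ a, v ∈ b := by
  rw [List.isEmpty_iff, List.eq_nil_iff_forall_not_mem]
  constructor
  · intro h b hb hall
    obtain ⟨k, hk, rfl⟩ := List.mem_iff_getElem.mp hb
    refine h (k : Int) ?_
    rw [pv_mem_cand]
    refine ⟨⟨by positivity, by exact_mod_cast hk⟩, fun v hv => ?_⟩
    rw [pv_mem_index]
    exact ⟨k, hk, rfl, hall v hv⟩
  · intro h i hi
    rw [pv_mem_cand] at hi
    obtain ⟨⟨h0, hn⟩, hall⟩ := hi
    have hk : i.toNat < ps.length := by omega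
    refine h ps[i.toNat] (List.getElem_mem hk) fun v hv => ?_
    have := hall v hv
    rw [pv_mem_index] at this
    obtain ⟨k, hk', hik, hvk⟩ := this
    have : k = i.toNat := by omega
    subst this; exact hvk

-- a list all of whose elements are a, updated into a set, is a single add
theorem pv_update_const (xs : List (List Int)) (s : PySem.Set (List Int)) (a : List Int)
    (hxs : ∀ x ∈ xs, x = a) (hne : xs ≠ []) :
    PySem.Set.update s xs = PySem.Set.add s a := by
  induction xs generalizing s with
  | nil => exact absurd rfl hne
  | cons x rest ih =>
    have hx : x = a := hxs x (List.mem_cons_self ..)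
    subst hx
    rw [PySem.Set.update_cons]
    rcases eq_or_ne rest [] with rfl | hr
    · simp [PySem.Set.update_nil]
    · rw [ih _ (fun y hy => hxs y (List.mem_cons_of_mem _ hy)) hr]
      exact PySem.Set.add_of_mem (by simp [PySem.Set.mem_add])

theorem pv_update_flatMap_congr (f g : List Int → List (List Int))
    (h : ∀ a, (∀ x ∈ f a, x = a) ∧ (∀ x ∈ g a, x = a) ∧ (f a = [] ↔ g a = []))
    (l : List (List Int)) (s : PySem.Set (List Int)) :
    PySem.Set.update s (l.flatMap f) = PySem.Set.update s (l.flatMap g) := by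
  induction l generalizing s with
  | nil => rfl
  | cons a rest ih =>
    rw [List.flatMap_cons, List.flatMap_cons, PySem.Set.update_append, PySem.Set.update_append, ih]
    congr 1
    obtain ⟨hf, hg, hiff⟩ := h a
    rcases eq_or_ne (f a) [] with hfa | hfa
    · rw [hfa, hiff.mp hfa]
    · rw [pv_update_const _ _ _ hf hfa, pv_update_const _ _ _ hg (fun hga => hfa (hiff.mpr hga))]

theorem pv_filter_eq_flatMap (p : List Int → Bool) (l : List (List Int)) :
    l.filter p = l.flatMap (fun a => if p a then [a] else []) := by
  induction l with
  | nil => rfl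
  | cons a rest ih =>
    by_cases h : p a <;> simp [List.flatMap_cons, h, ih]

theorem intersection_spec_core (ps tnp : List (List Int)) :
    intersection_of_tiles_and_possible_sets ps tnp = intersection_of_tiles_and_possible_sets_alt ps tnp := by
  unfold intersection_of_tiles_and_possible_sets intersection_of_tiles_and_possible_sets_alt
  split
  · rfl
  dsimp only
  -- A side: foldl over the product = filter-then-project
  rw [PySem.List.foldl_append_if (p := fun p : List Int × List Int => pvAllIn p.1 p.2) (f := Prod.fst)]
  -- B side: foldl = filter on non-empty candidate set
  have hstepB : (fun (h : List (List Int)) (a : List Int) =>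
      if (pvCand (pvBuildIndex ps) (ps.length : Int) a).isEmpty then h else h ++ [a])
      = fun h a => if !(pvCand (pvBuildIndex ps) (ps.length : Int) a).isEmpty then h ++ [a] else h := by
    funext h a
    cases (pvCand (pvBuildIndex ps) (ps.length : Int) a).isEmpty <;> rfl
  rw [hstepB, PySem.List.foldl_append_if_eq_filter]
  simp only [List.nil_append]
  rw [List.filter_flatMap, List.map_flatMap, pv_filter_eq_flatMap,
      ← PySem.Set.update_nil_left, ← PySem.Set.update_nil_left]
  apply pv_update_flatMap_congr
  intro a
  refine ⟨?_, ?_, ?_⟩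
  · intro x hx
    simp only [List.mem_map, List.mem_filter] at hx
    obtain ⟨p, ⟨⟨b, hb, rfl⟩, _⟩, rfl⟩ := hx
    rfl
  · intro x hx
    split at hx
    · simpa using hx
    · exact absurd hx (by simp)
  · rw [List.map_eq_nil_iff, List.filter_eq_nil_iff]
    constructor
    · intro hnone
      have : (pvCand (pvBuildIndex ps) (ps.length : Int) a).isEmpty = true := by
        rw [pv_cand_isEmpty]
        intro b hb hall
        exact absurd ((pvAllIn_iff a b).mpr hall)
          (by simpa using hnone (a, b) (List.mem_map.mpr ⟨b, hb, rfl⟩))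
      simp [this]
    · intro hnil p hp
      simp only [List.mem_map] at hp
      obtain ⟨b, hb, rfl⟩ := hp
      have he : (pvCand (pvBuildIndex ps) (ps.length : Int) a).isEmpty = true := by
        by_contra hc
        rw [Bool.not_eq_true] at hc
        rw [hc] at hnil
        exact absurd hnil (by simp)
      rw [pv_cand_isEmpty] at he
      cases hAll : pvAllIn a b with
      | false => simp
      | true => exact (he b hb ((pvAllIn_iff a b).mp hAll)).elim

-- ===== VERDICT (by name: the statement is the Claim_ definition above) =====
theorem intersection_of_tiles_and_possible_sets_spec : Claim_equal_intersection_of_tiles_and_possible_sets := by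
  intro ps tnp _
  unfold Spec_intersection_of_tiles_and_possible_sets
  exact intersection_spec_core ps tnp
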